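-- pv_equiv track=rewrite | github.com/alalapi-0/onepass-audio | scripts/onepass_cli.py | _casefold_pattern
-- ===== SOURCE A (Python) =====
-- def _casefold_pattern(pattern: str) -> str:
--     """将 glob 模式转换为大小写不敏感的形式。"""
--
--     result: list[str] = []
--     i = 0
--     while i < len(pattern):
--         ch = pattern[i]
--         if ch == "[":
--             # 保留原有字符集，直到遇到 ']'
--             end = pattern.find("]", i + 1)
--             if end == -1:
--                 result.append(ch)
--                 i += 1
--                 continue
--             result.append(pattern[i : end + 1])
--             i = end + 1
--             continue
--         if ch.isalpha():
--             lower = ch.lower()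
--             upper = ch.upper()
--             if lower == upper:
--                 result.append(ch)
--             else:
--                 result.append(f"[{lower}{upper}]")
--         else:
--             result.append(ch)
--         i += 1
--     return "".join(result)
-- ===== SOURCE B (Python) =====
-- import re
--
-- _TOKEN = re.compile(r'\[[^\]]*\]|.', re.DOTALL)
--
-- def _casefold_pattern(pattern: str) -> str:
--     """Tokenize the glob pattern with one regex pass: a complete [...] group
--     is kept whole, every other character is a single token."""
--     out = []
--     for m in _TOKEN.finditer(pattern):
--         tok = m.group()
--         if len(tok) > 1:
--             out.append(tok)
--         else:
--             lo, up = tok.lower(), tok.upper()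
--             out.append(f"[{lo}{up}]" if tok.isalpha() and lo != up else tok)
--     return "".join(out)
-- ===== Notes on version B (the rewrite author's own statement) =====
-- stated objective: idiomatic
-- what changed: Replaces the manual index/find loop with a single regex tokenization pass (re.finditer over '\[[^\]]*\]|.' with DOTALL) followed by a per-token mapping.
import Mathlib
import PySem

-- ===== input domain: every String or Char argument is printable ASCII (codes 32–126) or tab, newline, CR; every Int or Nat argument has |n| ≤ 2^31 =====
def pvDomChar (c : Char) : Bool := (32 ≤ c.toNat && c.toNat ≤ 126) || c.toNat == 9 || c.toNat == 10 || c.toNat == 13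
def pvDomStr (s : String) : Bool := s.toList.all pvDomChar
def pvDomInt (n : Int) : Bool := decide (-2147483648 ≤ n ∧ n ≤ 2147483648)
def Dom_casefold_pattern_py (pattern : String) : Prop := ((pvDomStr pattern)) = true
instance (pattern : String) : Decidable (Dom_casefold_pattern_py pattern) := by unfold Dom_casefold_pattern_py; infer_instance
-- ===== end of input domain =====

-- B replaces A's manual index/str.find loop by a one-pass regex-style tokenizer
-- (bracket group or single char) followed by a per-token mapping; objective: idiomatic.

-- ===== PORT A =====
-- A's while-loop over index i, transcribed as structural recursion on the suffix
-- pattern[i:]; pattern.find("]", i + 1) becomes PySem.Chars.find on the suffix tail.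
def pvAGo : List Char → List Char
  | [] => []
  | c :: rest =>
    if c = '[' then
      let e := PySem.Chars.find rest [']']
      if e = -1 then
        c :: pvAGo rest
      else
        ('[' :: rest.take (e.toNat + 1)) ++ pvAGo (rest.drop (e.toNat + 1))
    else if PySem.Chars.isalpha c then
      let l := PySem.Chars.lowerChar c
      let u := PySem.Chars.upperChar c
      if l = u then c :: pvAGo rest
      else '[' :: l :: u :: ']' :: pvAGo rest
    else c :: pvAGo rest
termination_by cs => cs.length
decreasing_by all_goals simp [List.length_drop]

def casefold_pattern_py (pattern : String) : String :=
  String.ofList (pvAGo pattern.toList)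

-- ===== PORT B =====
-- Hand port of Source B's regex r'\[[^\]]*\]|.' (DOTALL): at each position, a complete
-- bracket group (a '[' with a ']' somewhere after it; the match runs to the FIRST ']')
-- is one token, otherwise the single character is a token. Exact on all inputs.
def pvTok : List Char → List (List Char)
  | [] => []
  | c :: rest =>
    if c == '[' && PySem.Chars.isIn [']'] rest then
      let e := PySem.Chars.find rest [']']
      ('[' :: rest.take (e.toNat + 1)) :: pvTok (rest.drop (e.toNat + 1))
    else [c] :: pvTok rest
termination_by cs => cs.length
decreasing_by all_goals simp [List.length_drop]

-- Source B's per-single-char rule (tok.isalpha() and lo != up)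
def pvEmitChar (c : Char) : List Char :=
  if PySem.Chars.isalpha c && !(PySem.Chars.lowerChar c == PySem.Chars.upperChar c) then
    ['[', PySem.Chars.lowerChar c, PySem.Chars.upperChar c, ']']
  else [c]

-- Source B's loop body: len(tok) > 1 → the token itself, else the single-char rule
def pvEmit (t : List Char) : List Char :=
  if 1 < t.length then t else t.flatMap pvEmitChar

def casefold_pattern_py_alt (pattern : String) : String :=
  String.ofList (((pvTok pattern.toList).map pvEmit).flatten)

-- ===== PRECONDITION & SPEC =====
def Spec_casefold_pattern_py (pattern : String) (out : String) : Prop := out = casefold_pattern_py_alt pattern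
instance (pattern : String) (out : String) : Decidable (Spec_casefold_pattern_py pattern out) := by unfold Spec_casefold_pattern_py; infer_instance

-- ===== CLAIM (what is proved, stated in full; the proofs are below) =====
def Claim_equal_casefold_pattern_py : Prop := ∀ (pattern : String), Dom_casefold_pattern_py pattern → Spec_casefold_pattern_py pattern (casefold_pattern_py pattern)

-- ===== LEMMAS AND PROOFS =====

lemma pvMain : ∀ (n : ℕ) (cs : List Char), cs.length ≤ n →
    pvAGo cs = ((pvTok cs).map pvEmit).flatten := by
  intro n
  induction n with
  | zero =>
    intro cs h
    have : cs = [] := List.eq_nil_of_length_eq_zero (Nat.le_zero.mp h)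
    subst this
    simp [pvAGo, pvTok]
  | succ n ih =>
    intro cs h
    match cs with
    | [] => simp [pvAGo, pvTok]
    | c :: rest =>
      have hlen : rest.length ≤ n := by simpa using h
      by_cases hc : c = '['
      · subst hc
        by_cases hin : PySem.Chars.isIn [']'] rest = true
        · have hfind : PySem.Chars.find rest [']'] ≠ -1 := by
            rw [PySem.Chars.find_ne_neg_one_iff]
            exact (PySem.Chars.isIn_iff_infix _ _).mp hin
          have hrest : rest ≠ [] := by rintro rfl; revert hin; decide
          rw [pvAGo, pvTok]
          simp only [hin, beq_self_eq_true, Bool.true_and, if_true, if_neg hfind,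
            List.map_cons, List.flatten_cons]
          have hemit : pvEmit ('[' :: rest.take ((PySem.Chars.find rest [']']).toNat + 1))
              = '[' :: rest.take ((PySem.Chars.find rest [']']).toNat + 1) := by
            unfold pvEmit
            rw [if_pos]
            cases rest with
            | nil => exact absurd rfl hrest
            | cons a l => simp [List.take_succ_cons]
          rw [hemit]
          congr 1
          exact ih _ (le_trans (by simp) hlen)
        · have hfind : PySem.Chars.find rest [']'] = -1 := by
            rw [PySem.Chars.find_eq_neg_one_iff, ← PySem.Chars.isIn_iff_infix]
            simp [hin]
          rw [pvAGo, pvTok]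
          have h1 : pvEmit ['['] = ['['] := by decide
          simp [hfind, hin, h1, ih rest hlen]
      · rw [pvAGo, pvTok]
        have hb : (c == '[' && PySem.Chars.isIn [']'] rest) = false := by simp [hc]
        have hemit : pvEmit [c] = pvEmitChar c := by simp [pvEmit]
        simp only [hb, Bool.false_eq_true, if_false, if_neg hc, List.map_cons,
          List.flatten_cons, hemit]
        rw [← ih rest hlen]
        unfold pvEmitChar
        by_cases ha : PySem.Chars.isalpha c = true
        · by_cases hlu : PySem.Chars.lowerChar c = PySem.Chars.upperChar c
          · simp [ha, hlu]
          · simp [ha, hlu]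
        · simp [ha]

-- ===== VERDICT (by name: the statement is the Claim_ definition above) =====
theorem casefold_pattern_py_spec : Claim_equal_casefold_pattern_py := by
  intro pattern _
  unfold Spec_casefold_pattern_py casefold_pattern_py casefold_pattern_py_alt
  rw [pvMain pattern.toList.length pattern.toList le_rfl]
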